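-- pv_equiv track=rewrite | github.com/AlexSilva91/relatorio-atividades | acessar_planilha.py | processar_tecnicos_atividades
-- ===== SOURCE A (Python) =====
-- from collections import Counter, OrderedDict
--
-- def processar_tecnicos_atividades(contagem_atividades, tecnicos_a_evitar):
--     tecnicos_atividades = {}
--
--     for (tecnico, atividade), contagem in contagem_atividades.items():
--         if not isinstance(tecnico, str) or tecnico.strip() == "":
--             continue
--
--         if tecnico not in tecnicos_a_evitar:
--             if tecnico not in tecnicos_atividades:
--                 tecnicos_atividades[tecnico] = {}
--
--             tecnicos_atividades[tecnico][atividade] = contagem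
--
--     return OrderedDict(sorted(tecnicos_atividades.items()))
-- ===== SOURCE B (Python) =====
-- from collections import OrderedDict
-- from itertools import groupby
--
--
-- def processar_tecnicos_atividades(contagem_atividades, tecnicos_a_evitar):
--     validos = [
--         (tecnico, atividade, contagem)
--         for (tecnico, atividade), contagem in contagem_atividades.items()
--         if isinstance(tecnico, str)
--         and tecnico.strip() != ""
--         and tecnico not in tecnicos_a_evitar
--     ]
--     # stable sort by technician ONLY, so activity order inside a group is preserved
--     validos.sort(key=lambda item: item[0])
--     resultado = OrderedDict()
--     for tecnico, grupo in groupby(validos, key=lambda item: item[0]):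
--         resultado[tecnico] = {atividade: contagem for _, atividade, contagem in grupo}
--     return resultado
-- ===== Notes on version B (the rewrite author's own statement) =====
-- stated objective: idiomatic
-- what changed: Replaces the hash-group-then-sort-items strategy (nested dict filled per entry, then sorted at the end) by filter, one stable sort by technician, and a single itertools.groupby pass that builds each inner activity dict per group.
import Mathlib
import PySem

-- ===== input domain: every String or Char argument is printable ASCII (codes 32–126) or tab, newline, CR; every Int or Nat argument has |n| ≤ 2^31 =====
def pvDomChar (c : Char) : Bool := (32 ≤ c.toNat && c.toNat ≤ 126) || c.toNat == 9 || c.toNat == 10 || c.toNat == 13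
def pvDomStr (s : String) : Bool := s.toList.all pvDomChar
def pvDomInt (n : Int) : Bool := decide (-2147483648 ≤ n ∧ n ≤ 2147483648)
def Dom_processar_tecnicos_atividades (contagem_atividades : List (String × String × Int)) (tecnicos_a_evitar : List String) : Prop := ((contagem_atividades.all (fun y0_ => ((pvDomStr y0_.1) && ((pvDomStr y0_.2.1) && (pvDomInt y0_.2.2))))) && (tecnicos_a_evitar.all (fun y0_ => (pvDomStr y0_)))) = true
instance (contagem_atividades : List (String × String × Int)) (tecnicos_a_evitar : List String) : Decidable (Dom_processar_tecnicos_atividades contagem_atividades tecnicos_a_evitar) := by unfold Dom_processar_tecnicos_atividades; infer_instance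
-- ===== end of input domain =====

-- B replaces A's hash-group-then-sort by filter + one stable sort by technician + a single
-- groupby-style pass (more idiomatic; same results, return value only — neither mutates its input).

-- ===== PORT A =====
-- Python A iterates the dict items, skips blank/avoided technicians, fills a nested dict
-- (d[tecnico][atividade] = contagem), then returns OrderedDict(sorted(d.items())).
-- 'not isinstance(tecnico, str)' is always false under the type convention (keys are strings).
-- Python's sorted on the (key, dict) tuples orders by the key alone: keys are distinct, so the
-- second components are never compared; the port sorts by the first component.
def processar_tecnicos_atividades (contagem_atividades : List (String × String × Int)) (tecnicos_a_evitar : List String) : List (String × List (String × Int)) :=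
  let tecnicos_atividades :=
    contagem_atividades.foldl
      (fun (d : PySem.Dict String (PySem.Dict String Int)) e =>
        if PySem.Str.strip e.1 == "" then d
        else if tecnicos_a_evitar.contains e.1 then d
        else
          -- 'if tecnico not in d: d[tecnico] = {}' then 'd[tecnico][atividade] = contagem'
          let d1 := if d.contains e.1 then d else d.insert e.1 PySem.Dict.empty
          d1.insert e.1 ((d1.getD e.1 PySem.Dict.empty).insert e.2.1 e.2.2))
      PySem.Dict.empty
  (PySem.List.sorted tecnicos_atividades.items (fun q => q.1)).map (fun q => (q.1, q.2.items))

-- ===== PORT B =====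
-- itertools.groupby over the technician-sorted valid entries: one run of consecutive equal
-- technicians per output entry, inner dict built from the run.
def pvGroupRuns : List (String × String × Int) → List (String × List (String × Int))
  | [] => []
  | e :: rest =>
    let grupo := e :: rest.takeWhile (fun x => x.1 == e.1)
    let inner := grupo.foldl (fun (d : PySem.Dict String Int) x => d.insert x.2.1 x.2.2) PySem.Dict.empty
    (e.1, inner.items) :: pvGroupRuns (rest.dropWhile (fun x => x.1 == e.1))
termination_by l => l.length
decreasing_by
  simpa using Nat.lt_succ_of_le (List.length_dropWhile_le _ rest)

def processar_tecnicos_atividades_alt (contagem_atividades : List (String × String × Int)) (tecnicos_a_evitar : List String) : List (String × List (String × Int)) :=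
  let validos := contagem_atividades.filter
    (fun e => !(PySem.Str.strip e.1 == "") && !(tecnicos_a_evitar.contains e.1))
  pvGroupRuns (PySem.List.sorted validos (fun e => e.1))

-- ===== PRECONDITION & SPEC =====
def Spec_processar_tecnicos_atividades (contagem_atividades : List (String × String × Int)) (tecnicos_a_evitar : List String) (out : List (String × List (String × Int))) : Prop := out = processar_tecnicos_atividades_alt contagem_atividades tecnicos_a_evitar
instance (contagem_atividades : List (String × String × Int)) (tecnicos_a_evitar : List String) (out : List (String × List (String × Int))) : Decidable (Spec_processar_tecnicos_atividades contagem_atividades tecnicos_a_evitar out) := by unfold Spec_processar_tecnicos_atividades; infer_instance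

-- ===== CLAIM (what is proved, stated in full; the proofs are below) =====
def Claim_equal_processar_tecnicos_atividades : Prop := ∀ (contagem_atividades : List (String × String × Int)) (tecnicos_a_evitar : List String), Dom_processar_tecnicos_atividades contagem_atividades tecnicos_a_evitar → Spec_processar_tecnicos_atividades contagem_atividades tecnicos_a_evitar (processar_tecnicos_atividades contagem_atividades tecnicos_a_evitar)

-- ===== LEMMAS AND PROOFS =====

-- Proof-side abbreviations.
def pvP (ev : List String) (e : String × String × Int) : Bool :=
  !(PySem.Str.strip e.1 == "") && !(ev.contains e.1)

def pvInnerStep (d : PySem.Dict String Int) (e : String × String × Int) : PySem.Dict String Int :=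
  d.insert e.2.1 e.2.2

def pvInner (t : String) (l : List (String × String × Int)) : PySem.Dict String Int :=
  (l.filter (fun e => e.1 == t)).foldl pvInnerStep PySem.Dict.empty

def pvG (d : PySem.Dict String (PySem.Dict String Int)) (e : String × String × Int) : PySem.Dict String (PySem.Dict String Int) :=
  d.insert e.1 ((d.getD e.1 PySem.Dict.empty).insert e.2.1 e.2.2)

def pvKeys : List (String × String × Int) → List String
  | [] => []
  | e :: rest => e.1 :: pvKeys (rest.dropWhile (fun x => x.1 == e.1))
termination_by l => l.length
decreasing_by
  simpa using Nat.lt_succ_of_le (List.length_dropWhile_le _ rest)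

-- ---- A side ----

theorem pvA_fold (ca : List (String × String × Int)) (ev : List String) :
    ca.foldl
      (fun (d : PySem.Dict String (PySem.Dict String Int)) e =>
        if PySem.Str.strip e.1 == "" then d
        else if ev.contains e.1 then d
        else
          let d1 := if d.contains e.1 then d else d.insert e.1 PySem.Dict.empty
          d1.insert e.1 ((d1.getD e.1 PySem.Dict.empty).insert e.2.1 e.2.2))
      PySem.Dict.empty
    = (ca.filter (pvP ev)).foldl pvG PySem.Dict.empty := by
  have hfun : (fun (d : PySem.Dict String (PySem.Dict String Int)) e =>
        if PySem.Str.strip e.1 == "" then d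
        else if ev.contains e.1 then d
        else
          let d1 := if d.contains e.1 then d else d.insert e.1 PySem.Dict.empty
          d1.insert e.1 ((d1.getD e.1 PySem.Dict.empty).insert e.2.1 e.2.2))
      = (fun d e => if pvP ev e then pvG d e else d) := by
    funext d e
    cases hb1 : (PySem.Str.strip e.1 == "") with
    | true =>
      have hp : pvP ev e = false := by simp only [pvP, hb1, Bool.not_true, Bool.false_and]
      simp [hp]
    | false =>
      cases hb2 : ev.contains e.1 with
      | true =>
        have hp : pvP ev e = false := by
          simp only [pvP, hb1, hb2, Bool.not_true, Bool.not_false, Bool.and_false]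
        simp [hp]
      | false =>
        have hp : pvP ev e = true := by
          simp only [pvP, hb1, hb2, Bool.not_false, Bool.and_self]
        by_cases h3 : (d.contains e.1) = true
        · simp [hp, h3, pvG]
        · simp [hp, h3, pvG, PySem.Dict.insert_insert_self, PySem.Dict.getD_insert_self,
            PySem.Dict.getD_of_not_contains d _ (by simpa using h3)]
  rw [hfun, PySem.List.foldl_if_eq_foldl_filter]

theorem pvA_getD (l : List (String × String × Int)) (d : PySem.Dict String (PySem.Dict String Int)) (t : String) :
    (l.foldl pvG d).getD t PySem.Dict.empty
      = (l.filter (fun e => e.1 == t)).foldl pvInnerStep (d.getD t PySem.Dict.empty) := by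
  induction l generalizing d with
  | nil => rfl
  | cons e l ih =>
    by_cases h : e.1 = t
    · simp only [List.foldl_cons, List.filter_cons, h, BEq.rfl, if_true, ih]
      simp [pvG, pvInnerStep, h, PySem.Dict.getD_insert_self]
    · have hb : (e.1 == t) = false := by simpa using h
      simp only [List.foldl_cons, List.filter_cons, hb, Bool.false_eq_true, if_false, ih]
      simp [pvG, PySem.Dict.getD_insert_of_ne _ _ _ (Ne.symm h)]

theorem pvA_keys (l : List (String × String × Int)) :
    (l.foldl pvG PySem.Dict.empty).keys = PySem.Set.ofList (l.map (fun e => e.1)) := by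
  have hG : pvG = fun d e => d.insert e.1 ((d.getD e.1 PySem.Dict.empty).insert e.2.1 e.2.2) := rfl
  rw [hG, PySem.Dict.keys_foldl_insert_key l (fun e => e.1)
    (fun d e => (d.getD e.1 PySem.Dict.empty).insert e.2.1 e.2.2) PySem.Dict.empty]
  simp [PySem.Dict.keys_empty, PySem.Set.update_nil_left]

theorem pvA_nodup (l : List (String × String × Int)) :
    (l.foldl pvG PySem.Dict.empty).keys.Nodup := by
  have hG : pvG = fun d e => d.insert e.1 ((d.getD e.1 PySem.Dict.empty).insert e.2.1 e.2.2) := rfl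
  rw [hG]
  exact PySem.Dict.nodup_keys_foldl_insert_key l (fun e => e.1)
    (fun d e => (d.getD e.1 PySem.Dict.empty).insert e.2.1 e.2.2) PySem.Dict.empty
    (by simp [PySem.Dict.keys_empty])

theorem pvA_char (ca : List (String × String × Int)) (ev : List String) :
    processar_tecnicos_atividades ca ev
      = (PySem.List.sorted (PySem.Set.ofList ((ca.filter (pvP ev)).map (fun e => e.1))) (fun t => t)).map
          (fun t => (t, (pvInner t (ca.filter (pvP ev))).items)) := by
  have h0 : processar_tecnicos_atividades ca ev
      = (PySem.List.sorted ((ca.filter (pvP ev)).foldl pvG PySem.Dict.empty).items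
          (fun q => q.1)).map (fun q => (q.1, q.2.items)) := by
    unfold processar_tecnicos_atividades
    rw [pvA_fold ca ev]
  rw [h0]
  have hitems : ((ca.filter (pvP ev)).foldl pvG PySem.Dict.empty).items
      = (PySem.Set.ofList ((ca.filter (pvP ev)).map (fun e => e.1))).map
          (fun t => (t, pvInner t (ca.filter (pvP ev)))) := by
    rw [PySem.Dict.items_eq_map_keys _ (pvA_nodup (ca.filter (pvP ev))) PySem.Dict.empty,
      pvA_keys (ca.filter (pvP ev))]
    refine List.map_congr_left ?_
    intro t _
    have h1 := pvA_getD (ca.filter (pvP ev)) PySem.Dict.empty t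
    rw [PySem.Dict.getD_empty] at h1
    rw [h1]
    rfl
  rw [hitems]
  have hsorted : PySem.List.sorted
        ((PySem.Set.ofList ((ca.filter (pvP ev)).map (fun e => e.1))).map
          (fun t => (t, pvInner t (ca.filter (pvP ev))))) (fun q => q.1)
      = (PySem.List.sorted (PySem.Set.ofList ((ca.filter (pvP ev)).map (fun e => e.1)))
          (fun t => t)).map (fun t => (t, pvInner t (ca.filter (pvP ev)))) := by
    apply PySem.List.sorted_eq_of_perm_of_pairwise_lt
    · exact (PySem.List.sorted_perm _ _ _).map _
    · rw [List.pairwise_map]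
      exact PySem.List.sorted_ofList_pairwise_lt _
  rw [hsorted, List.map_map]
  rfl

-- ---- stability of the sort ----

theorem pvS1 (t : String) (x : String × String × Int) (ys : List (String × String × Int))
    (hx : (x.1 == t) = false) :
    (PySem.List.insertBy (fun a b => decide (a.1 < b.1)) x ys).filter (fun e => e.1 == t)
      = ys.filter (fun e => e.1 == t) := by
  induction ys with
  | nil => simp [PySem.List.insertBy, hx]
  | cons y ys ih =>
    rw [PySem.List.insertBy.eq_2]
    by_cases h : (decide (x.1 < y.1)) = true
    · rw [if_pos h]
      simp [List.filter_cons, hx]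
    · rw [if_neg h]
      simp only [List.filter_cons, ih]

theorem pvS2 (t : String) (x : String × String × Int) (ys : List (String × String × Int))
    (hx : x.1 = t) (hp : ys.Pairwise (fun a b => a.1 ≤ b.1)) :
    (PySem.List.insertBy (fun a b => decide (a.1 < b.1)) x ys).filter (fun e => e.1 == t)
      = ys.filter (fun e => e.1 == t) ++ [x] := by
  induction ys with
  | nil => simp [PySem.List.insertBy, hx]
  | cons y ys ih =>
    rw [PySem.List.insertBy.eq_2]
    rcases List.pairwise_cons.mp hp with ⟨hy, hp'⟩
    by_cases h : (decide (x.1 < y.1)) = true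
    · rw [if_pos h]
      have hxy : t < y.1 := hx ▸ of_decide_eq_true h
      have hnil : (y :: ys).filter (fun e => e.1 == t) = [] := by
        rw [List.filter_eq_nil_iff]
        intro z hz
        rcases List.mem_cons.mp hz with rfl | hz'
        · simp [ne_of_gt hxy]
        · have hz2 : t < z.1 := lt_of_lt_of_le hxy (hy z hz')
          simp [ne_of_gt hz2]
      simp [hx, hnil]
    · rw [if_neg h]
      simp only [List.filter_cons]
      rw [ih hp']
      by_cases hyt : (y.1 == t) = true <;> simp [hyt]

theorem pvS3 (t : String) (l acc : List (String × String × Int))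
    (hp : acc.Pairwise (fun a b => a.1 ≤ b.1)) :
    (l.foldl (fun acc x => PySem.List.insertBy (fun a b => decide (a.1 < b.1)) x acc) acc).filter (fun e => e.1 == t)
      = acc.filter (fun e => e.1 == t) ++ l.filter (fun e => e.1 == t) := by
  induction l generalizing acc with
  | nil => simp
  | cons x l ih =>
    simp only [List.foldl_cons]
    have hacc' := PySem.List.insertBy_pairwise_le (fun e => e.1) x acc hp
    rw [ih _ hacc']
    by_cases hx : (x.1 == t) = true
    · have hx' : x.1 = t := by simpa using hx
      rw [pvS2 t x acc hx' hp]
      simp [hx, List.append_assoc]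
    · rw [pvS1 t x acc (by simpa using hx)]
      simp [hx]

theorem pvStable (t : String) (l : List (String × String × Int)) :
    (PySem.List.sorted l (fun e => e.1)).filter (fun e => e.1 == t) = l.filter (fun e => e.1 == t) := by
  rw [PySem.List.sorted_eq_foldl_insertBy]
  simpa using pvS3 t l [] List.Pairwise.nil

-- ---- B side: the grouping pass on a key-sorted list ----

theorem pvDropGt (t : String) (rest : List (String × String × Int))
    (hge : ∀ x ∈ rest, t ≤ x.1) (hp : rest.Pairwise (fun a b => a.1 ≤ b.1)) :
    ∀ x ∈ rest.dropWhile (fun x => x.1 == t), t < x.1 := by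
  induction rest with
  | nil => simp [List.dropWhile]
  | cons y ys ih =>
    rcases List.pairwise_cons.mp hp with ⟨hy, hp'⟩
    rw [List.dropWhile_cons]
    by_cases h : (y.1 == t) = true
    · rw [if_pos h]
      exact ih (fun x hx => hge x (List.mem_cons_of_mem _ hx)) hp'
    · rw [if_neg h]
      intro x hx
      have hyt : t < y.1 :=
        lt_of_le_of_ne (hge y (List.mem_cons_self)) (fun hh => h (by simp [hh.symm]))
      rcases List.mem_cons.mp hx with rfl | hx'
      · exact hyt
      · exact lt_of_lt_of_le hyt (hy x hx')

theorem pvKeys_mem (l : List (String × String × Int)) (t' : String) :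
    t' ∈ pvKeys l → t' ∈ l.map (fun e => e.1) := by
  induction l using pvKeys.induct with
  | case1 => simp [pvKeys]
  | case2 e rest ih =>
    intro h
    rw [pvKeys] at h
    rcases List.mem_cons.mp h with rfl | h'
    · simp
    · have h2 := ih h'
      rcases List.mem_map.mp h2 with ⟨x, hx, rfl⟩
      exact List.mem_map.mpr ⟨x, List.mem_cons_of_mem _ ((List.dropWhile_sublist _).mem hx), rfl⟩

theorem pvKeys_mem_iff (l : List (String × String × Int))
    (hp : l.Pairwise (fun a b => a.1 ≤ b.1)) (t' : String) :
    t' ∈ pvKeys l ↔ t' ∈ l.map (fun e => e.1) := by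
  refine ⟨pvKeys_mem l t', ?_⟩
  induction l using pvKeys.induct with
  | case1 => simp
  | case2 e rest ih =>
    intro h
    rw [pvKeys]
    rcases List.mem_cons.mp h with rfl | h'
    · exact List.mem_cons_self
    · rcases List.mem_map.mp h' with ⟨x, hx, rfl⟩
      conv at hx => rw [← List.takeWhile_append_dropWhile (p := fun x => x.1 == e.1) (l := rest)]
      rcases List.mem_append.mp hx with hx1 | hx2
      · have := List.mem_takeWhile_imp hx1
        simp only [beq_iff_eq] at this
        rw [this]
        exact List.mem_cons_self
      · refine List.mem_cons_of_mem _ (ih ?_ (List.mem_map.mpr ⟨x, hx2, rfl⟩))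
        exact (List.Pairwise.sublist (List.dropWhile_sublist _) ((List.pairwise_cons.mp hp).2))

theorem pvKeys_lt (l : List (String × String × Int))
    (hp : l.Pairwise (fun a b => a.1 ≤ b.1)) :
    (pvKeys l).Pairwise (· < ·) := by
  induction l using pvKeys.induct with
  | case1 => simp [pvKeys]
  | case2 e rest ih =>
    rcases List.pairwise_cons.mp hp with ⟨hge, hp'⟩
    rw [pvKeys]
    refine List.pairwise_cons.mpr ⟨?_, ih (List.Pairwise.sublist (List.dropWhile_sublist _) hp')⟩
    intro t' ht'
    rcases List.mem_map.mp (pvKeys_mem _ t' ht') with ⟨x, hx, rfl⟩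
    exact pvDropGt e.1 rest hge hp' x hx

theorem pvGroup_char (l : List (String × String × Int))
    (hp : l.Pairwise (fun a b => a.1 ≤ b.1)) :
    pvGroupRuns l = (pvKeys l).map (fun t => (t, (pvInner t l).items)) := by
  induction l using pvKeys.induct with
  | case1 => simp [pvGroupRuns, pvKeys]
  | case2 e rest ih =>
    rcases List.pairwise_cons.mp hp with ⟨hge, hp'⟩
    have hgt : ∀ x ∈ rest.dropWhile (fun x => x.1 == e.1), e.1 < x.1 := pvDropGt e.1 rest hge hp'
    have hfilter : (e :: rest).filter (fun x => x.1 == e.1)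
        = e :: rest.takeWhile (fun x => x.1 == e.1) := by
      rw [List.filter_cons, if_pos (by simp)]
      congr 1
      conv_lhs => rw [← List.takeWhile_append_dropWhile (p := fun x => x.1 == e.1) (l := rest)]
      rw [List.filter_append,
        List.filter_eq_self.mpr (fun x hx => List.mem_takeWhile_imp (p := fun x => x.1 == e.1) (l := rest) hx),
        List.filter_eq_nil_iff.mpr (fun x hx => by simp [ne_of_gt (hgt x hx)]),
        List.append_nil]
    rw [pvGroupRuns, pvKeys, List.map_cons]
    congr 1
    · have : pvInner e.1 (e :: rest)
          = (e :: rest.takeWhile (fun x => x.1 == e.1)).foldl pvInnerStep PySem.Dict.empty := by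
        rw [pvInner, hfilter]
      rw [this]
      rfl
    · rw [ih (List.Pairwise.sublist (List.dropWhile_sublist _) hp')]
      refine List.map_congr_left ?_
      intro t ht
      have htgt : e.1 < t := by
        rcases List.mem_map.mp (pvKeys_mem _ t ht) with ⟨x, hx, rfl⟩
        exact hgt x hx
      have hfl : (e :: rest).filter (fun x => x.1 == t)
          = (rest.dropWhile (fun x => x.1 == e.1)).filter (fun x => x.1 == t) := by
        rw [List.filter_cons, if_neg (by simp [ne_of_lt htgt])]
        conv_lhs => rw [← List.takeWhile_append_dropWhile (p := fun x => x.1 == e.1) (l := rest)]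
        rw [List.filter_append,
          List.filter_eq_nil_iff.mpr (fun x hx => by
            have hxe := List.mem_takeWhile_imp hx
            simp only [beq_iff_eq] at hxe
            simp [hxe, ne_of_lt htgt]),
          List.nil_append]
      rw [pvInner, pvInner, hfl]

-- ===== VERDICT (by name: the statement is the Claim_ definition above) =====
theorem processar_tecnicos_atividades_spec : Claim_equal_processar_tecnicos_atividades := by
  intro ca ev _
  unfold Spec_processar_tecnicos_atividades processar_tecnicos_atividades_alt
  show processar_tecnicos_atividades ca ev
      = pvGroupRuns (PySem.List.sorted (ca.filter (pvP ev)) (fun e => e.1))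
  rw [pvA_char ca ev]
  have hpair : (PySem.List.sorted (ca.filter (pvP ev)) (fun e => e.1)).Pairwise
      (fun a b => a.1 ≤ b.1) := PySem.List.sorted_pairwise _ _
  rw [pvGroup_char _ hpair]
  have hnodup : (pvKeys (PySem.List.sorted (ca.filter (pvP ev)) (fun e => e.1))).Nodup :=
    (pvKeys_lt _ hpair).imp (fun h => ne_of_lt h)
  have hkeys : PySem.List.sorted (PySem.Set.ofList ((ca.filter (pvP ev)).map (fun e => e.1)))
        (fun t => t)
      = pvKeys (PySem.List.sorted (ca.filter (pvP ev)) (fun e => e.1)) := by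
    apply PySem.List.sorted_eq_of_perm_of_pairwise_lt
    · refine (List.perm_ext_iff_of_nodup hnodup (PySem.Set.nodup_ofList _)).mpr ?_
      intro a
      rw [pvKeys_mem_iff _ hpair a, PySem.Set.mem_ofList]
      exact ((PySem.List.sorted_perm (ca.filter (pvP ev)) (fun e => e.1) false).map
        (fun e => e.1)).mem_iff
    · exact pvKeys_lt _ hpair
  rw [hkeys]
  refine List.map_congr_left ?_
  intro t _
  have hst : pvInner t (PySem.List.sorted (ca.filter (pvP ev)) (fun e => e.1))
      = pvInner t (ca.filter (pvP ev)) := by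
    rw [pvInner, pvInner, pvStable]
  rw [hst]
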